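-- pv_equiv track=rewrite | github.com/Bejjoeqq/auto_gen_sertif | sergen.py | nameser
-- ===== SOURCE A (Python) =====
-- def nameser(nama):
--     names = nama
--     if len(nama)>20:
--         names = ""
--         lens = 0
--         phrase = nama.split()
--         for x in phrase:
--             lens += len(x)
--             if lens>20:
--                 names += x[:1] + ". "
--             else:
--                 names += x + " "
--     return names
-- ===== SOURCE B (Python) =====
-- def nameser(nama):
--     if len(nama) <= 20:
--         return nama
--     words = nama.split()
--     # find the cut point: number of leading words whose inclusive cumulative length stays <= 20
--     total = 0
--     k = 0
--     for w in words:
--         if total + len(w) > 20: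
--             break
--         total += len(w)
--         k += 1
--     kept = "".join(w + " " for w in words[:k])
--     abbr = "".join(w[:1] + ". " for w in words[k:])
--     return kept + abbr
-- ===== Notes on version B (the rewrite author's own statement) =====
-- stated objective: alternative
-- what changed: Instead of one fold that threads a running length and builds the string word by word with a per-word branch, B first locates the single cut index k (cumulative word lengths are monotone, so the keep/abbreviate decision flips exactly once), then produces the output from the two slices words[:k] and words[k:] with separate joins.
import Mathlib
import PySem

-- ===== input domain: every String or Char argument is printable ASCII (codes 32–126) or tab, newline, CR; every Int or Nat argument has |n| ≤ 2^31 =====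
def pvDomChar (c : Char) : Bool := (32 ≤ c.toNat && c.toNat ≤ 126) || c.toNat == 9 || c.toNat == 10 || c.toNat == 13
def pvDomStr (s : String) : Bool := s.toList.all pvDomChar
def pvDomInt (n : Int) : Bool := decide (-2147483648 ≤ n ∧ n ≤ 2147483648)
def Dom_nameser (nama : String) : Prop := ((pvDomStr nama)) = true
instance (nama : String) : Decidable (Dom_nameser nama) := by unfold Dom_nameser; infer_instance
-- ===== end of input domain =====

-- B replaces A's single fold (running length + per-word branch) by first finding the one cut index k, then joining the two word slices; objective: alternative decomposition, same cost.


-- ===== PORT A =====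
-- A: split, then one fold threading (names, lens); abbreviate once the running length exceeds 20
def nameser (nama : String) : String :=
  let names := nama
  if 20 < PySem.Str.len nama then
    let phrase := PySem.Chars.split₀ nama.toList
    let r := phrase.foldl (fun (st : List Char × Int) x =>
        let lens := st.2 + (x.length : Int)
        if 20 < lens then (st.1 ++ PySem.Chars.slice x none (some 1) ++ ". ".toList, lens)
        else (st.1 ++ x ++ " ".toList, lens)) ([], 0)
    String.ofList r.1
  else names

-- ===== PORT B =====
-- B: find the cut index k first (loop with break), then join the two slices separately
def findK_nameser : List (List Char) → Int → Nat
  | [], _ => 0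
  | w :: ws, total =>
      if 20 < total + (w.length : Int) then 0
      else 1 + findK_nameser ws (total + (w.length : Int))

def nameser_alt (nama : String) : String :=
  if PySem.Str.len nama ≤ 20 then nama
  else
    let words := PySem.Chars.split₀ nama.toList
    let k := findK_nameser words 0
    let kept := ((words.take k).map (fun w => w ++ " ".toList)).flatten
    let abbr := ((words.drop k).map (fun w => PySem.Chars.slice w none (some 1) ++ ". ".toList)).flatten
    String.ofList (kept ++ abbr)

-- ===== PRECONDITION & SPEC =====
def Spec_nameser (nama : String) (out : String) : Prop := out = nameser_alt nama
instance (nama : String) (out : String) : Decidable (Spec_nameser nama out) := by unfold Spec_nameser; infer_instance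

-- ===== CLAIM (what is proved, stated in full; the proofs are below) =====
def Claim_equal_nameser : Prop := ∀ (nama : String), Dom_nameser nama → Spec_nameser nama (nameser nama)

-- ===== LEMMAS AND PROOFS =====

-- once the running length is past 20, the fold only appends abbreviations
lemma foldA_abbr (ws : List (List Char)) : ∀ (acc : List Char) (lens : Int), 20 < lens →
    (ws.foldl (fun (st : List Char × Int) x =>
        if 20 < st.2 + (x.length : Int) then
          (st.1 ++ PySem.Chars.slice x none (some 1) ++ ". ".toList, st.2 + (x.length : Int))
        else (st.1 ++ x ++ " ".toList, st.2 + (x.length : Int))) (acc, lens)).1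
    = acc ++ (ws.map (fun w => PySem.Chars.slice w none (some 1) ++ ". ".toList)).flatten := by
  induction ws with
  | nil => intro acc lens h; simp
  | cons w ws ih =>
      intro acc lens h
      have h' : 20 < lens + (w.length : Int) := by
        have : (0:Int) ≤ (w.length : Int) := Int.natCast_nonneg _
        omega
      simp only [List.foldl_cons, List.map_cons, List.flatten_cons, if_pos h']
      rw [ih _ _ h']
      simp [List.append_assoc]

-- A's fold equals B's cut-point decomposition
lemma foldA_eq_cut (ws : List (List Char)) : ∀ (acc : List Char) (lens : Int),
    (ws.foldl (fun (st : List Char × Int) x =>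
        if 20 < st.2 + (x.length : Int) then
          (st.1 ++ PySem.Chars.slice x none (some 1) ++ ". ".toList, st.2 + (x.length : Int))
        else (st.1 ++ x ++ " ".toList, st.2 + (x.length : Int))) (acc, lens)).1
    = acc ++ ((ws.take (findK_nameser ws lens)).map (fun w => w ++ " ".toList)).flatten
          ++ ((ws.drop (findK_nameser ws lens)).map
                (fun w => PySem.Chars.slice w none (some 1) ++ ". ".toList)).flatten := by
  induction ws with
  | nil => intro acc lens; simp [findK_nameser]
  | cons w ws ih =>
      intro acc lens
      by_cases h : 20 < lens + (w.length : Int)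
      · simp only [findK_nameser, if_pos h, List.take_zero, List.drop_zero,
          List.foldl_cons, List.map_nil, List.flatten_nil, List.append_nil]
        rw [foldA_abbr ws _ _ h]
        simp [List.append_assoc]
      · simp only [findK_nameser, if_neg h, List.foldl_cons]
        rw [ih]
        have h1 : 1 + findK_nameser ws (lens + (w.length : Int))
            = findK_nameser ws (lens + (w.length : Int)) + 1 := Nat.add_comm _ _
        simp [h1, List.take_succ_cons, List.drop_succ_cons, List.append_assoc]

-- ===== VERDICT (by name: the statement is the Claim_ definition above) =====
theorem nameser_spec : Claim_equal_nameser := by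
  intro nama _
  unfold Spec_nameser
  by_cases h : 20 < PySem.Str.len nama
  · simp only [nameser, nameser_alt, if_pos h, if_neg (show ¬ PySem.Str.len nama ≤ 20 by omega)]
    rw [foldA_eq_cut]
    simp
  · simp only [nameser, nameser_alt, if_neg h, if_pos (show PySem.Str.len nama ≤ 20 by omega)]
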